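-- pv_equiv track=rewrite | github.com/ashleysally00/ai-job-search-agent | job_search_agent.py | _matches_strict
-- ===== SOURCE A (Python) =====
-- def _matches_strict(title: str) -> bool:
--     """Strict filter: AI content / UX / prompt / design roles."""
--     title_lower = title.lower()
--     ai_keywords = ["ai", "artificial intelligence", "ml", "machine learning", "llm", "gpt", "claude"]
--     function_keywords = [
--         "prompt engineer",
--         "content engineer",
--         "ai content",
--         "ai writer",
--         "content strategist",
--         "ux",
--         "user experience",
--         "product design",
--         "interaction design",
--     ]
--     for kw in function_keywords:
--         if kw in title_lower:
--             if kw in ["ux", "user experience", "product design", "interaction design"]: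
--                 return any(ai in title_lower for ai in ai_keywords)
--             return True
--     return False
-- ===== SOURCE B (Python) =====
-- def _matches_strict(title: str) -> bool:
--     """Strict filter: AI content / UX / prompt / design roles."""
--     t = title.lower()
--     content = ("prompt engineer", "content engineer", "ai content", "ai writer", "content strategist")
--     ux = ("ux", "user experience", "product design", "interaction design")
--     ai = ("ai", "artificial intelligence", "ml", "machine learning", "llm", "gpt", "claude")
--     has_content = has_ux = has_ai = False
--     # one pass over the title: at each position record which category starts there
--     for i in range(len(t)):
--         has_content = has_content or t.startswith(content, i)
--         has_ux = has_ux or t.startswith(ux, i)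
--         has_ai = has_ai or t.startswith(ai, i)
--     return has_content or (has_ux and has_ai)
-- ===== Notes on version B (the rewrite author's own statement) =====
-- stated objective: alternative
-- what changed: Instead of A's first-match loop over an ordered keyword list with substring tests, B makes a single pass over the positions of the lowercased title, accumulating three per-category flags via suffix.startswith, and returns content or (ux and ai).
import Mathlib
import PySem

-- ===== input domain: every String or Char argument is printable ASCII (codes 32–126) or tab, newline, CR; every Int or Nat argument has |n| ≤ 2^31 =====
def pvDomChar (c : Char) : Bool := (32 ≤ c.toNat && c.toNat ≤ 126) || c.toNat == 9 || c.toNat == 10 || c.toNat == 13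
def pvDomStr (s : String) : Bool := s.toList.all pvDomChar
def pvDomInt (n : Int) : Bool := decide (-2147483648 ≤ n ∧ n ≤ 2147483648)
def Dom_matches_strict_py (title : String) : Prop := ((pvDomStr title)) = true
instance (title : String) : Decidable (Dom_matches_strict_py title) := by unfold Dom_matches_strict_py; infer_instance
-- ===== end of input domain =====

-- B replaces A's ordered first-match keyword loop by a single pass over the positions of the
-- lowercased title, accumulating one flag per keyword category and combining them at the end
-- (objective: alternative decomposition, same cost).

-- ===== PORT A =====
-- A's for-loop over function_keywords, first match wins (structural recursion over the list).
def matchesStrictLoopA (tl : String) (aiKeywords : List String) : List String → Bool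
  | [] => false
  | kw :: rest =>
    if PySem.Str.isIn kw tl then
      if kw ∈ ["ux", "user experience", "product design", "interaction design"] then
        aiKeywords.any (fun ai => PySem.Str.isIn ai tl)
      else
        true
    else
      matchesStrictLoopA tl aiKeywords rest

def matches_strict_py (title : String) : Bool :=
  let titleLower := PySem.Str.lower title
  let aiKeywords := ["ai", "artificial intelligence", "ml", "machine learning", "llm", "gpt", "claude"]
  let functionKeywords := ["prompt engineer", "content engineer", "ai content", "ai writer",
    "content strategist", "ux", "user experience", "product design", "interaction design"]
  matchesStrictLoopA titleLower aiKeywords functionKeywords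

-- ===== PORT B =====
def pvContentKws : List String := ["prompt engineer", "content engineer", "ai content", "ai writer", "content strategist"]
def pvUxKws : List String := ["ux", "user experience", "product design", "interaction design"]
def pvAiKws : List String := ["ai", "artificial intelligence", "ml", "machine learning", "llm", "gpt", "claude"]

-- one iteration of B's for-loop: test each category at position i and update the three flags
-- (Python's t.startswith(tuple, i) is `any` of "the keyword is a prefix of the suffix at i")
def pvScanStep (cs : List Char) (st : Bool × Bool × Bool) (i : Nat) : Bool × Bool × Bool :=
  let suf := cs.drop i
  (st.1 || pvContentKws.any (fun kw => PySem.Chars.startswith suf kw.toList),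
   st.2.1 || pvUxKws.any (fun kw => PySem.Chars.startswith suf kw.toList),
   st.2.2 || pvAiKws.any (fun kw => PySem.Chars.startswith suf kw.toList))

def matches_strict_py_alt (title : String) : Bool :=
  let t := (PySem.Str.lower title).toList
  let st := (List.range t.length).foldl (pvScanStep t) (false, false, false)
  st.1 || (st.2.1 && st.2.2)

-- ===== PRECONDITION & SPEC =====
def Spec_matches_strict_py (title : String) (out : Bool) : Prop := out = matches_strict_py_alt title
instance (title : String) (out : Bool) : Decidable (Spec_matches_strict_py title out) := by unfold Spec_matches_strict_py; infer_instance

-- ===== CLAIM (what is proved, stated in full; the proofs are below) =====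
def Claim_equal_matches_strict_py : Prop := ∀ (title : String), Dom_matches_strict_py title → Spec_matches_strict_py title (matches_strict_py title)

-- ===== LEMMAS AND PROOFS =====

-- the triple fold computes: each flag ORed with "some position satisfies that category's test"
lemma foldl_pvScanStep (cs : List Char) (xs : List Nat) (a b c : Bool) :
    xs.foldl (pvScanStep cs) (a, b, c)
      = (a || xs.any (fun i => pvContentKws.any (fun kw => PySem.Chars.startswith (cs.drop i) kw.toList)),
         b || xs.any (fun i => pvUxKws.any (fun kw => PySem.Chars.startswith (cs.drop i) kw.toList)),
         c || xs.any (fun i => pvAiKws.any (fun kw => PySem.Chars.startswith (cs.drop i) kw.toList))) := by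
  induction xs generalizing a b c with
  | nil => simp
  | cons x xs ih => simp [pvScanStep, ih, Bool.or_assoc]

-- "some position < length where some nonempty keyword starts" = "some keyword is a substring"
lemma any_range_startswith (s : List Char) (kws : List String) (h : ∀ kw ∈ kws, kw ≠ "") :
    (List.range s.length).any
        (fun i => kws.any (fun kw => PySem.Chars.startswith (s.drop i) kw.toList))
      = kws.any (fun kw => PySem.Chars.isIn kw.toList s) := by
  rw [Bool.eq_iff_iff]
  simp only [List.any_eq_true, List.mem_range, PySem.Chars.startswith_iff,
    PySem.Chars.isIn_iff_infix]
  constructor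
  · rintro ⟨i, _, kw, hkw, hp⟩
    exact ⟨kw, hkw, hp.isInfix.trans (List.drop_suffix i s).isInfix⟩
  · rintro ⟨kw, hkw, hinf⟩
    have := (PySem.Chars.exists_prefix_drop_iff_isIn (sub := kw.toList) (s := s)).2
    rw [PySem.Chars.isIn_iff_infix] at this
    obtain ⟨j, hj⟩ := (PySem.Chars.exists_prefix_drop_iff_isIn (sub := kw.toList) (s := s)).mpr
      ((PySem.Chars.isIn_iff_infix _ _).2 hinf)
    by_cases hlt : j < s.length
    · exact ⟨j, hlt, kw, hkw, hj⟩
    · exfalso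
      have hnil : s.drop j = [] := List.drop_eq_nil_of_le (by omega)
      rw [hnil, List.prefix_nil] at hj
      have : kw ≠ "" := h kw hkw
      cases kw
      simp_all
  
-- ===== VERDICT (by name: the statement is the Claim_ definition above) =====
theorem matches_strict_py_spec : Claim_equal_matches_strict_py := by
  intro title _
  unfold Spec_matches_strict_py matches_strict_py matches_strict_py_alt
  dsimp only
  rw [foldl_pvScanStep,
    any_range_startswith _ pvContentKws (by decide),
    any_range_startswith _ pvUxKws (by decide),
    any_range_startswith _ pvAiKws (by decide)]
  simp only [matchesStrictLoopA, pvContentKws, pvUxKws, pvAiKws, List.any_cons, List.any_nil,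
    List.mem_cons, List.not_mem_nil, PySem.Str.isIn_eq]
  norm_num
  split_ifs <;> simp_all
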